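-- pv_equiv track=rewrite | github.com/gyeh/hospital-mrf | python/scrape-cms-hpt.py | parse_cms_hpt
-- ===== SOURCE A (Python) =====
-- def parse_cms_hpt(text):
--     """Parse cms-hpt.txt key-value format into a list of entry dicts."""
--     entries = []
--     current = {}
--
--     for line in text.splitlines():
--         line = line.strip()
--         if not line:
--             if current:
--                 entries.append(current)
--                 current = {}
--             continue
--
--         if ": " in line:
--             key, _, value = line.partition(": ")
--             key = key.strip().lower()
--             current[key] = value.strip()
--
--     if current:
--         entries.append(current)
--
--     return entries
-- ===== SOURCE B (Python) =====
-- def parse_cms_hpt(text):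
--     """Parse cms-hpt.txt key-value format into a list of entry dicts."""
--     blocks = []
--     cur = []
--     for raw in text.splitlines():
--         line = raw.strip()
--         if line:
--             cur.append(line)
--         elif cur:
--             blocks.append(cur)
--             cur = []
--     if cur:
--         blocks.append(cur)
--     dicts = [
--         {ln.partition(": ")[0].strip().lower(): ln.partition(": ")[2].strip()
--          for ln in block if ": " in ln}
--         for block in blocks
--     ]
--     return [d for d in dicts if d]
-- ===== Notes on version B (the rewrite author's own statement) =====
-- stated objective: alternative
-- what changed: B splits the work into phases: first group lines into maximal non-blank blocks, then build each block's dict by comprehension, then filter out empty dicts, instead of A's single pass with an interleaved entries/current accumulator.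
import Mathlib
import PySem

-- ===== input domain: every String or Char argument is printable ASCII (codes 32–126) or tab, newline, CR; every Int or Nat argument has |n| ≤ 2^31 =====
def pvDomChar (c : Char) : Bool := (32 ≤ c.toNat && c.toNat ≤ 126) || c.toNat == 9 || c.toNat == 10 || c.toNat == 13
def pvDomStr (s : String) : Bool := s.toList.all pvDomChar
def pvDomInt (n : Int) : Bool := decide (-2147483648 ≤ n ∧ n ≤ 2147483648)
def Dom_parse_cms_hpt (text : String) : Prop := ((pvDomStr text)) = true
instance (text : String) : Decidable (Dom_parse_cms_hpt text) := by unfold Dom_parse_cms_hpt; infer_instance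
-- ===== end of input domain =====

-- B groups lines into non-blank blocks first, builds each block's dict, then filters empty dicts,
-- instead of A's single pass with interleaved entries/current accumulators (alternative decomposition).


-- shared partition helper: `line.partition(": ")` when `": " in line` holds
-- (exact: find gives the first occurrence index, the tail starts 2 chars later)
def pvKey (line : List Char) : String :=
  String.ofList (PySem.Chars.lower (PySem.Chars.strip (line.take (PySem.Chars.find line (": ".toList)).toNat)))
def pvVal (line : List Char) : String :=
  String.ofList (PySem.Chars.strip (line.drop ((PySem.Chars.find line (": ".toList)).toNat + 2)))

-- ===== PORT A =====
-- one step of A's loop: state = (entries, current)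
def pvStepA (st : List (PySem.Dict String String) × PySem.Dict String String) (raw : List Char) :
    List (PySem.Dict String String) × PySem.Dict String String :=
  let line := PySem.Chars.strip raw
  if line.isEmpty then
    (if st.2.items.isEmpty then st else (st.1 ++ [st.2], PySem.Dict.empty))
  else if PySem.Chars.isIn (": ".toList) line then
    (st.1, st.2.insert (pvKey line) (pvVal line))
  else st

def parse_cms_hpt (text : String) : List (List (String × String)) :=
  let st := (PySem.Chars.splitlines text.toList).foldl pvStepA ([], PySem.Dict.empty)
  let entries := if st.2.items.isEmpty then st.1 else st.1 ++ [st.2]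
  entries.map (fun d => d.items)

-- ===== PORT B =====
-- phase 1 step: state = (blocks, cur), collect maximal runs of non-blank (stripped) lines
def pvStepB (st : List (List (List Char)) × List (List Char)) (raw : List Char) :
    List (List (List Char)) × List (List Char) :=
  let line := PySem.Chars.strip raw
  if !line.isEmpty then (st.1, st.2 ++ [line])
  else if !st.2.isEmpty then (st.1 ++ [st.2], [])
  else st

-- phase 2: the dict comprehension over the ": " lines of a block
def pvMkDict (block : List (List Char)) : PySem.Dict String String :=
  block.foldl (fun d ln =>
    if PySem.Chars.isIn (": ".toList) ln then d.insert (pvKey ln) (pvVal ln) else d)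
    PySem.Dict.empty

def parse_cms_hpt_alt (text : String) : List (List (String × String)) :=
  let st := (PySem.Chars.splitlines text.toList).foldl pvStepB ([], [])
  let blocks := if st.2.isEmpty then st.1 else st.1 ++ [st.2]
  let dicts := blocks.map pvMkDict
  (dicts.filter (fun d => !d.items.isEmpty)).map (fun d => d.items)

-- ===== PRECONDITION & SPEC =====
def Spec_parse_cms_hpt (text : String) (out : List (List (String × String))) : Prop := out = parse_cms_hpt_alt text
instance (text : String) (out : List (List (String × String))) : Decidable (Spec_parse_cms_hpt text out) := by unfold Spec_parse_cms_hpt; infer_instance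

-- ===== CLAIM (what is proved, stated in full; the proofs are below) =====
def Claim_equal_parse_cms_hpt : Prop := ∀ (text : String), Dom_parse_cms_hpt text → Spec_parse_cms_hpt text (parse_cms_hpt text)

-- ===== LEMMAS AND PROOFS =====

-- blocks already collected by pvStepB are only appended to
theorem pvStepB_prefix (l : List (List Char)) (bs : List (List (List Char))) (c : List (List Char)) :
    l.foldl pvStepB (bs, c) =
      (bs ++ (l.foldl pvStepB ([], c)).1, (l.foldl pvStepB ([], c)).2) := by
  induction l generalizing bs c with
  | nil => simp
  | cons raw l ih =>
    simp only [List.foldl_cons, pvStepB]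
    by_cases h1 : (PySem.Chars.strip raw).isEmpty
    · by_cases h2 : c.isEmpty
      · simp only [h1, h2, Bool.not_true, Bool.false_eq_true, if_false]
        exact ih bs c
      · rw [Bool.not_eq_true] at h2
        simp only [h1, h2, Bool.not_true, Bool.not_false, Bool.false_eq_true, if_false, if_true]
        rw [ih (bs ++ [c]) [], ih ([] ++ [c]) []]
        simp
    · rw [Bool.not_eq_true] at h1
      simp only [h1, Bool.not_false, if_true]
      rw [ih bs (c ++ [PySem.Chars.strip raw]), ih [] (c ++ [PySem.Chars.strip raw])]

-- appending one non-blank stripped line to a block extends its dict by one step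
theorem pvMkDict_append (c : List (List Char)) (s : List Char) :
    pvMkDict (c ++ [s]) =
      (if PySem.Chars.isIn (": ".toList) s
       then (pvMkDict c).insert (pvKey s) (pvVal s) else pvMkDict c) := by
  simp [pvMkDict, List.foldl_append]

theorem pvMkDict_nil : pvMkDict [] = PySem.Dict.empty := rfl

-- a dict with empty items is the empty dict
theorem pvDict_eq_empty (d : PySem.Dict String String) (h : d.items.isEmpty = true) :
    d = PySem.Dict.empty := by
  apply PySem.Dict.ext
  simpa [List.isEmpty_iff] using h

-- the main invariant: A's remaining run, with current = pvMkDict c, produces the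
-- filtered dicts of the blocks B still builds from (l, c)
theorem pvMain (l : List (List Char)) (e : List (PySem.Dict String String)) (c : List (List Char)) :
    (let st := l.foldl pvStepA (e, pvMkDict c);
     (if st.2.items.isEmpty then st.1 else st.1 ++ [st.2])) =
    e ++ ((let st := l.foldl pvStepB ([], c);
           (if st.2.isEmpty then st.1 else st.1 ++ [st.2])).map pvMkDict).filter
            (fun d => !d.items.isEmpty) := by
  induction l generalizing e c with
  | nil =>
    simp only [List.foldl_nil]
    by_cases hc : c.isEmpty
    · have hcc : c = [] := by simpa [List.isEmpty_iff] using hc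
      subst hcc
      simp [pvMkDict_nil, PySem.Dict.empty]
    · rw [Bool.not_eq_true] at hc
      simp only [hc, Bool.false_eq_true, if_false]
      by_cases hd : (pvMkDict c).items.isEmpty
      · simp [hd]
      · rw [Bool.not_eq_true] at hd
        simp [hd]
  | cons raw l ih =>
    simp only [List.foldl_cons, pvStepA, pvStepB]
    by_cases h1 : (PySem.Chars.strip raw).isEmpty
    · simp only [h1, Bool.not_true, Bool.false_eq_true, if_false, if_true]
      by_cases hd : (pvMkDict c).items.isEmpty
      · -- current dict empty: A keeps state; B may still push the (dict-empty) block
        have hce : pvMkDict c = pvMkDict [] := by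
          rw [pvMkDict_nil]; exact pvDict_eq_empty _ hd
        by_cases hc : c.isEmpty
        · have hcc : c = [] := by simpa [List.isEmpty_iff] using hc
          subst hcc
          simp only [hd, if_true, List.isEmpty_nil, Bool.not_true, Bool.false_eq_true, if_false]
          exact ih e []
        · rw [Bool.not_eq_true] at hc
          simp only [hd, if_true, hc, Bool.not_false]
          rw [hce, ih e [], pvStepB_prefix l ([] ++ [c]) []]
          by_cases hrest : (List.foldl pvStepB ([], []) l).2.isEmpty <;>
            simp [hrest, List.filter_cons, hd]
      · -- current dict nonempty: A pushes it; B pushes the block c (c ≠ [] since its dict isn't)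
        have hc : c.isEmpty = false := by
          rw [Bool.eq_false_iff]
          intro h
          have hcc : c = [] := by simpa [List.isEmpty_iff] using h
          subst hcc
          exact hd (by simp [pvMkDict_nil, PySem.Dict.empty])
        rw [Bool.not_eq_true] at hd
        simp only [hd, Bool.false_eq_true, if_false, hc, Bool.not_false, if_true]
        have hpush := ih (e ++ [pvMkDict c]) []
        rw [pvMkDict_nil] at hpush
        rw [hpush, pvStepB_prefix l ([] ++ [c]) []]
        by_cases hrest : (List.foldl pvStepB ([], []) l).2.isEmpty <;>
          simp [hrest, List.filter_cons, hd]
    · -- non-blank line: both extend the current block/dict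
      rw [Bool.not_eq_true] at h1
      simp only [h1, Bool.false_eq_true, if_false, Bool.not_false, if_true]
      by_cases h2 : PySem.Chars.isIn (": ".toList) (PySem.Chars.strip raw)
      · simp only [h2, if_true]
        have := ih e (c ++ [PySem.Chars.strip raw])
        rw [pvMkDict_append, if_pos h2] at this
        exact this
      · rw [Bool.not_eq_true] at h2
        simp only [h2, Bool.false_eq_true, if_false]
        have := ih e (c ++ [PySem.Chars.strip raw])
        rw [pvMkDict_append] at this
        simp only [h2, Bool.false_eq_true, if_false] at this
        exact this

-- ===== VERDICT (by name: the statement is the Claim_ definition above) =====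
theorem parse_cms_hpt_spec : Claim_equal_parse_cms_hpt := by
  intro text _
  show _ = _
  unfold parse_cms_hpt parse_cms_hpt_alt
  have h := pvMain (PySem.Chars.splitlines text.toList) [] []
  rw [pvMkDict_nil] at h
  simp only [h, List.nil_append]
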